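-- pv_equiv track=rewrite | github.com/nevertheless0404/Study_slowly | 2022.08.21/음양더하기.py | soloution
-- ===== SOURCE A (Python) =====
-- def soloution(absolutes, signs):
--     # sings 가 참이면 해당 absoluted은 실제 정수가 양수, 거짓이면 음수
--     # 주어진 수에 하나씩 접근
--     # 양수, 음수가 적용된 실제 합
--     answer = 0
--     for i in range(len(absolutes)):
--         if signs[i]:
--             answer += absolutes[i]
--         else:
--             answer -= absolutes[i]
--     return answer
-- ===== SOURCE B (Python) =====
-- def soloution(absolutes, signs):
--     total = sum(absolutes)
--     neg = sum(absolutes[i] for i in range(len(absolutes)) if not signs[i])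
--     return total - 2 * neg
-- ===== Notes on version B (the rewrite author's own statement) =====
-- stated objective: alternative
-- what changed: Instead of one loop that branches per element to add or subtract, B sums all absolutes unconditionally and then subtracts twice the sum of the negatively-signed ones (total - 2*neg).
import Mathlib
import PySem

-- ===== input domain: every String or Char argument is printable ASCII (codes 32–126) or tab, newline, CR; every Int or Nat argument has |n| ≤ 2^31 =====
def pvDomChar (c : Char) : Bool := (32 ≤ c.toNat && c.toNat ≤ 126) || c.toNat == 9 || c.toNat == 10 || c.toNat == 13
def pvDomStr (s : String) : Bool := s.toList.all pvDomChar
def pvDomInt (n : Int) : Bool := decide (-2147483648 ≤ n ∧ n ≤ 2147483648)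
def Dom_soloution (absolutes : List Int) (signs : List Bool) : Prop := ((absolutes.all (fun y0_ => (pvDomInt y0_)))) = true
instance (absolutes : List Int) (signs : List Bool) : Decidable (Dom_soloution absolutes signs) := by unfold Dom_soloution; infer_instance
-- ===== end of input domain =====

-- B replaces A's per-element add/subtract branch by total - 2*neg (sum of all absolutes minus
-- twice the sum of the negatively-signed ones); same O(n) cost, different decomposition.

-- ===== PORT A =====
-- for i in range(len(absolutes)): if signs[i]: answer += absolutes[i] else: answer -= absolutes[i]
def soloution (absolutes : List Int) (signs : List Bool) : Int :=
  (PySem.List.pyRange 0 absolutes.length 1).foldl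
    (fun answer i =>
      if PySem.List.pyGetD signs i false then answer + PySem.List.pyGetD absolutes i 0
      else answer - PySem.List.pyGetD absolutes i 0) 0

-- ===== PORT B =====
-- total = sum(absolutes); neg = sum(absolutes[i] for i in range(len(absolutes)) if not signs[i])
def soloution_alt (absolutes : List Int) (signs : List Bool) : Int :=
  let total := absolutes.foldl (fun acc x => acc + x) 0
  let neg := (PySem.List.pyRange 0 absolutes.length 1).foldl
    (fun acc i =>
      if !(PySem.List.pyGetD signs i false) then acc + PySem.List.pyGetD absolutes i 0
      else acc) 0
  total - 2 * neg

-- ===== PRECONDITION & SPEC =====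
-- Python A (and B) raise IndexError via signs[i] when signs is shorter than absolutes; exactly those inputs are excluded.
def Pre_soloution (absolutes : List Int) (signs : List Bool) : Prop :=
  absolutes.length ≤ signs.length
instance (absolutes : List Int) (signs : List Bool) : Decidable (Pre_soloution absolutes signs) := by
  unfold Pre_soloution; infer_instance
def pvWitness_soloution : List Int × List Bool := ([4, 7, 12], [true, false, true])

def Spec_soloution (absolutes : List Int) (signs : List Bool) (out : Int) : Prop := out = soloution_alt absolutes signs
instance (absolutes : List Int) (signs : List Bool) (out : Int) : Decidable (Spec_soloution absolutes signs out) := by unfold Spec_soloution; infer_instance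

-- ===== CLAIM (what is proved, stated in full; the proofs are below) =====
def Claim_equal_soloution : Prop := ∀ (absolutes : List Int) (signs : List Bool), Dom_soloution absolutes signs → Pre_soloution absolutes signs → Spec_soloution absolutes signs (soloution absolutes signs)

-- ===== LEMMAS AND PROOFS =====

-- A's loop with accumulator: init + sum of signed terms
theorem foldl_signed (l : List Int) (p : Int → Bool) (f : Int → Int) (init : Int) :
    l.foldl (fun acc i => if p i then acc + f i else acc - f i) init
      = init + (l.map (fun i => if p i then f i else -f i)).sum := by
  induction l generalizing init with
  | nil => simp
  | cons x xs ih =>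
    simp only [List.foldl_cons, List.map_cons, List.sum_cons, ih]
    by_cases h : p x <;> simp [h] <;> ring

-- B's neg loop with accumulator: init + sum of the negatively-signed terms
theorem foldl_neg (l : List Int) (p : Int → Bool) (f : Int → Int) (init : Int) :
    l.foldl (fun acc i => if !(p i) then acc + f i else acc) init
      = init + (l.map (fun i => if p i then 0 else f i)).sum := by
  induction l generalizing init with
  | nil => simp
  | cons x xs ih =>
    simp only [List.foldl_cons, List.map_cons, List.sum_cons, ih]
    by_cases h : p x <;> simp [h] <;> ring

-- pointwise identity summed over the list
theorem sum_signed_split (l : List Int) (p : Int → Bool) (f : Int → Int) :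
    (l.map (fun i => if p i then f i else -f i)).sum
      = (l.map f).sum - 2 * (l.map (fun i => if p i then 0 else f i)).sum := by
  induction l with
  | nil => simp
  | cons x xs ih =>
    simp only [List.map_cons, List.sum_cons, ih]
    by_cases h : p x <;> simp [h] <;> ring

theorem foldl_add_sum (l : List Int) (init : Int) :
    l.foldl (fun acc x => acc + x) init = init + l.sum := by
  induction l generalizing init with
  | nil => simp
  | cons x xs ih => simp [List.foldl_cons, ih]; ring

-- ===== VERDICT (by name: the statement is the Claim_ definition above) =====
theorem soloution_spec : Claim_equal_soloution := by
  intro absolutes signs _ _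
  unfold Spec_soloution soloution soloution_alt
  rw [foldl_signed, foldl_neg, sum_signed_split]
  rw [PySem.List.map_pyGetD_pyRange_zero' absolutes 0, foldl_add_sum]
  ring
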